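-- pv_equiv track=rewrite | github.com/GreenyRepublic/Advent-of-Code-2021 | 10_Syntax_Scoring.py | GetLineCompletion
-- ===== SOURCE A (Python) =====
-- from typing import Deque, List, Tuple
--
-- MATCHING_BRACES = {
--     '{' : '}',
--     '[' : ']',
--     '(' : ')',
--     '<' : '>'
-- }
--
-- def GetLineCompletion(line : str) -> str:
--     braceStack = Deque()
--     for char in line:
--         if char in MATCHING_BRACES.keys():
--             braceStack.append(char)
--
--         elif char in MATCHING_BRACES.values():
--             braceStack.pop()
--
--     output = ""
--     braceStack.reverse()
--     for brace in braceStack: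
--         output += MATCHING_BRACES[brace]
--
--     return output
-- ===== SOURCE B (Python) =====
-- MATCHING_BRACES = {
--     '{' : '}',
--     '[' : ']',
--     '(' : ')',
--     '<' : '>'
-- }
--
-- def GetLineCompletion(line : str) -> str:
--     # Scan right-to-left with a debt counter instead of a stack:
--     # a closer owes one cancellation; an opener either pays a pending
--     # debt or is unmatched, and its closer is emitted immediately
--     # (rightmost unmatched opener first, which is A's output order).
--     out = []
--     debt = 0
--     for char in reversed(line):
--         if char in MATCHING_BRACES.values():
--             debt += 1
--         elif char in MATCHING_BRACES:
--             if debt > 0: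
--                 debt -= 1
--             else:
--                 out.append(MATCHING_BRACES[char])
--     return ''.join(out)
-- ===== Notes on version B (the rewrite author's own statement) =====
-- stated objective: alternative
-- what changed: B replaces A's stack-then-reverse-then-emit with a right-to-left scan keeping only an integer debt counter: a closer increments the debt, an opener either pays a pending debt or emits its matching closer immediately, so no stack, reverse or second pass exists.
import Mathlib
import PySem

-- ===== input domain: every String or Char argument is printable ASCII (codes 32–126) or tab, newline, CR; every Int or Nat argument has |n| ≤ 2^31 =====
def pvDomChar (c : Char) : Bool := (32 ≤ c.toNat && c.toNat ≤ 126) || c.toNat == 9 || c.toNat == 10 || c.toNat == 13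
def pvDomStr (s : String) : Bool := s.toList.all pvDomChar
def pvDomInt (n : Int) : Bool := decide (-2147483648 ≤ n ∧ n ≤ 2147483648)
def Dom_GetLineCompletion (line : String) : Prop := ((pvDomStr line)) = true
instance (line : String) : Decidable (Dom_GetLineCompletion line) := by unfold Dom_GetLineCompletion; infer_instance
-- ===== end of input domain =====

-- B replaces A's stack/reverse/emit with a right-to-left scan and a debt counter;
-- return values are proved equal wherever A returns.

-- char in MATCHING_BRACES.keys()
def pvIsOpener (c : Char) : Bool := c == '{' || c == '[' || c == '(' || c == '<'
-- char in MATCHING_BRACES.values()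
def pvIsCloser (c : Char) : Bool := c == '}' || c == ']' || c == ')' || c == '>'
-- MATCHING_BRACES[c] (only ever applied to openers in both programs)
def pvCloserOf (c : Char) : Char :=
  if c == '{' then '}' else if c == '[' then ']'
  else if c == '(' then ')' else if c == '<' then '>' else c

-- ===== PORT A =====
-- first loop: maintain the deque of openers (pop on an empty deque raises in Python; Pre_ excludes that)
def GetLineCompletionStack (l : List Char) (st : List Char) : List Char :=
  match l with
  | [] => st
  | c :: rest =>
      if pvIsOpener c then GetLineCompletionStack rest (st ++ [c])
      else if pvIsCloser c then GetLineCompletionStack rest st.dropLast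
      else GetLineCompletionStack rest st

-- second loop: output += MATCHING_BRACES[brace] over the reversed stack
def GetLineCompletionEmit (l : List Char) (out : List Char) : List Char :=
  match l with
  | [] => out
  | b :: rest => GetLineCompletionEmit rest (out ++ [pvCloserOf b])

def GetLineCompletion (line : String) : String :=
  String.ofList (GetLineCompletionEmit (GetLineCompletionStack line.toList []).reverse [])

-- ===== PORT B =====
-- the for-loop of Source B over reversed(line), carrying (debt, out)
def GetLineCompletionRL (l : List Char) (debt : Nat) (out : List Char) : List Char :=
  match l with
  | [] => out
  | c :: rest =>
      if pvIsCloser c then GetLineCompletionRL rest (debt + 1) out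
      else if pvIsOpener c then
        if debt > 0 then GetLineCompletionRL rest (debt - 1) out
        else GetLineCompletionRL rest debt (out ++ [pvCloserOf c])
      else GetLineCompletionRL rest debt out

def GetLineCompletion_alt (line : String) : String :=
  String.ofList (GetLineCompletionRL line.toList.reverse 0 [])

-- ===== PRECONDITION & SPEC =====
-- Pre_ excludes exactly the inputs on which Python A raises IndexError (a closing brace with no
-- matching opener pending): every prefix must contain at least as many openers as closers.
def Pre_GetLineCompletion (line : String) : Prop :=
  ∀ i ∈ List.range (line.toList.length + 1),
    (line.toList.take i).countP pvIsCloser ≤ (line.toList.take i).countP pvIsOpener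
instance (line : String) : Decidable (Pre_GetLineCompletion line) := by
  unfold Pre_GetLineCompletion; infer_instance

def pvWitness_GetLineCompletion : String := "<{[(x)]}"

def Spec_GetLineCompletion (line : String) (out : String) : Prop := out = GetLineCompletion_alt line
instance (line : String) (out : String) : Decidable (Spec_GetLineCompletion line out) := by unfold Spec_GetLineCompletion; infer_instance

-- ===== CLAIM (what is proved, stated in full; the proofs are below) =====
def Claim_equal_GetLineCompletion : Prop := ∀ (line : String), Dom_GetLineCompletion line → Pre_GetLineCompletion line → Spec_GetLineCompletion line (GetLineCompletion line)
-- ===== LEMMAS AND PROOFS =====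

lemma emit_eq (l out : List Char) : GetLineCompletionEmit l out = out ++ l.map pvCloserOf := by
  induction l generalizing out with
  | nil => simp [GetLineCompletionEmit]
  | cons b rest ih => simp [GetLineCompletionEmit, ih]

lemma stack_append (l1 l2 st : List Char) :
    GetLineCompletionStack (l1 ++ l2) st = GetLineCompletionStack l2 (GetLineCompletionStack l1 st) := by
  induction l1 generalizing st with
  | nil => simp [GetLineCompletionStack]
  | cons c rest ih =>
    simp only [List.cons_append, GetLineCompletionStack]
    split_ifs <;> apply ih

lemma closer_not_opener (c : Char) (h : pvIsCloser c = true) : pvIsOpener c = false := by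
  simp only [pvIsCloser, Bool.or_eq_true, beq_iff_eq] at h
  rcases h with ((h | h) | h) | h <;> subst h <;> decide

lemma rev_dropLast_drop (s : List Char) (d : Nat) :
    s.dropLast.reverse.drop d = s.reverse.drop (d + 1) := by
  rw [← List.tail_reverse]
  generalize s.reverse = t
  cases t <;> simp

-- the right-to-left debt scan computes the reversed unmatched-opener stack, mapped to closers
lemma rl_eq_stack (l : List Char) (debt : Nat) (out : List Char) :
    GetLineCompletionRL l.reverse debt out
      = out ++ (((GetLineCompletionStack l []).reverse.drop debt).map pvCloserOf) := by
  induction l using List.reverseRecOn generalizing debt out with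
  | nil => simp [GetLineCompletionRL, GetLineCompletionStack]
  | append_singleton xs c ih =>
    rw [List.reverse_append, List.reverse_singleton, List.singleton_append, stack_append]
    simp only [GetLineCompletionRL, GetLineCompletionStack]
    by_cases hc : pvIsCloser c = true
    · rw [if_pos hc, closer_not_opener c hc]
      simp only [Bool.false_eq_true, if_false, if_pos hc, ih]
      rw [rev_dropLast_drop]
    · rw [if_neg hc]
      by_cases ho : pvIsOpener c = true
      · rw [if_pos ho, if_pos ho]
        by_cases hd : debt > 0
        · rw [if_pos hd, ih, List.reverse_append, List.reverse_singleton,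
            List.singleton_append]
          obtain ⟨d, rfl⟩ : ∃ d, debt = d + 1 := ⟨debt - 1, by omega⟩
          simp
        · rw [if_neg hd, ih]
          have h0 : debt = 0 := by omega
          subst h0
          simp
      · rw [if_neg ho, if_neg ho, if_neg hc, ih]

-- ===== VERDICT (by name: the statement is the Claim_ definition above) =====
theorem GetLineCompletion_spec : Claim_equal_GetLineCompletion := by
  intro line _ _
  unfold Spec_GetLineCompletion GetLineCompletion GetLineCompletion_alt
  rw [emit_eq, rl_eq_stack]
  simp
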